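-- pv_equiv track=rewrite | github.com/rahulsamant37/Daily-Task | Python/Strick/python_question_1021.py | longest_increasing_subsequence_with_target
-- ===== SOURCE A (Python) =====
-- def longest_increasing_subsequence_with_target(nums, target):
--     """
--     Finds the length of the longest increasing subsequence (LIS) in nums that ends with the target value.
--
--     Args:
--         nums: A list of integers.
--         target: The target integer.
--
--     Returns:
--         The length of the longest increasing subsequence ending with the target value, or 0 if no such LIS exists.
--     """
--
--     n = len(nums)
--     # dp[i] stores the length of the longest increasing subsequence ending with nums[i]
--     dp = [0] * n
--
--     for i in range(n):
--         # Iterate through all elements before nums[i]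
--         for j in range(i):
--             # If nums[i] is greater than nums[j], it can potentially extend the subsequence ending at nums[j]
--             if nums[i] > nums[j]:
--                 # Update dp[i] with the maximum length found so far, by extending LIS ending at nums[j]
--                 dp[i] = max(dp[i], dp[j])
--
--         # Increment dp[i] by 1 to include nums[i] itself in the subsequence
--         dp[i] += 1
--
--     # Find the maximum length among all LIS that end with the target value
--     max_len = 0
--     for i in range(n):
--         if nums[i] == target:
--             max_len = max(max_len, dp[i])
--
--     return max_len
-- ===== SOURCE B (Python) =====
-- from bisect import bisect_left
--
-- def longest_increasing_subsequence_with_target(nums, target):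
--     # Patience-sorting pass: `tails` holds, for each length L, the smallest
--     # possible last element of a strictly increasing subsequence of length L
--     # drawn from the elements < target seen so far.  At each occurrence of
--     # target the best answer there is 1 + len(tails); the last occurrence wins
--     # (it is always >= earlier ones), so we just overwrite.
--     tails = []
--     ans = 0
--     for x in nums:
--         if x == target:
--             ans = 1 + len(tails)
--         elif x < target:
--             i = bisect_left(tails, x)
--             if i == len(tails):
--                 tails.append(x)
--             else:
--                 tails[i] = x
--     return ans
-- ===== Notes on version B (the rewrite author's own statement) =====
-- stated objective: faster
-- what changed: Replaces the O(n^2) dp-array over indices plus a second scan for target by a single patience-sorting pass (binary search into a sorted tails list of elements < target), updating the answer at each occurrence of target.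
import Mathlib
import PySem

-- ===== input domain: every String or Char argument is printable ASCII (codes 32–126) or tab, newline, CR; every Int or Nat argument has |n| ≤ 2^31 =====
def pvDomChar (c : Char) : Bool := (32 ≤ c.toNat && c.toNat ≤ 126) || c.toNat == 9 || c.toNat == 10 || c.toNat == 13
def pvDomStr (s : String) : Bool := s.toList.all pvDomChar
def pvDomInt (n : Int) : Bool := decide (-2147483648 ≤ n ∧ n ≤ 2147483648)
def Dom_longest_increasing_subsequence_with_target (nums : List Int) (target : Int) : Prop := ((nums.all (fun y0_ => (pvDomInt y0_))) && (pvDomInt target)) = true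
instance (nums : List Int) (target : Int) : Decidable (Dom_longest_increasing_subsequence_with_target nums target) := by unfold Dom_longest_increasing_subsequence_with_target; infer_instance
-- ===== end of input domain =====

-- B replaces A's O(n^2) index dp plus a second scan by a single patience-sorting pass
-- (binary search into a sorted `tails` list of elements < target); measurably faster on large inputs.


-- ===== PORT A =====
-- literal transliteration of A: dp array over indices (quadratic double loop), then a scan for target
def longest_increasing_subsequence_with_target (nums : List Int) (target : Int) : Int :=
  let n : Int := PySem.List.len nums
  let dp : List Int :=
    (PySem.List.pyRange 0 n 1).foldl (fun dp i =>
      let dp :=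
        (PySem.List.pyRange 0 i 1).foldl (fun dp j =>
          if PySem.List.pyGetD nums j 0 < PySem.List.pyGetD nums i 0 then
            PySem.List.pySetD dp i (max (PySem.List.pyGetD dp i 0) (PySem.List.pyGetD dp j 0))
          else dp) dp
      PySem.List.pySetD dp i (PySem.List.pyGetD dp i 0 + 1)) (List.replicate n.toNat 0)
  (PySem.List.pyRange 0 n 1).foldl (fun maxLen i =>
    if PySem.List.pyGetD nums i 0 = target then max maxLen (PySem.List.pyGetD dp i 0) else maxLen) 0

-- ===== PORT B =====
-- literal transliteration of B (Source B): one pass, `tails` patience list + running answer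
def longest_increasing_subsequence_with_target_alt (nums : List Int) (target : Int) : Int :=
  (nums.foldl (fun (st : List Int × Int) x =>
    if x = target then (st.1, 1 + PySem.List.len st.1)
    else if x < target then
      let i := PySem.List.bisectLeft st.1 x
      if i = st.1.length then (st.1 ++ [x], st.2) else (st.1.set i x, st.2)
    else st) ([], 0)).2

-- ===== PRECONDITION & SPEC =====
def Spec_longest_increasing_subsequence_with_target (nums : List Int) (target : Int) (out : Int) : Prop := out = longest_increasing_subsequence_with_target_alt nums target
instance (nums : List Int) (target : Int) (out : Int) : Decidable (Spec_longest_increasing_subsequence_with_target nums target out) := by unfold Spec_longest_increasing_subsequence_with_target; infer_instance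

-- ===== CLAIM (what is proved, stated in full; the proofs are below) =====
def Claim_equal_longest_increasing_subsequence_with_target : Prop := ∀ (nums : List Int) (target : Int), Dom_longest_increasing_subsequence_with_target nums target → Spec_longest_increasing_subsequence_with_target nums target (longest_increasing_subsequence_with_target nums target)

-- ===== LEMMAS AND PROOFS =====

-- value/dp pairs of A's quadratic recurrence, kept as the common reference point
def pvM (ps : List (Int × Int)) (x : Int) : Int :=
  ps.foldl (fun m p => if p.1 < x then max m p.2 else m) 0

def pvStep (ps : List (Int × Int)) (x : Int) : List (Int × Int) := ps ++ [(x, pvM ps x + 1)]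

def pvPairs (l : List Int) : List (Int × Int) := l.foldl pvStep []

def pvAns (ps : List (Int × Int)) (c : Int) : Int :=
  ps.foldl (fun m p => if p.1 = c then max m p.2 else m) 0

def pvFlt (l : List Int) (c : Int) : List Int := l.filter (fun v => decide (v < c))

-- patience invariant: t is the sorted list of minimal tails for the pairs ps
def pvInv (ps : List (Int × Int)) (t : List Int) : Prop :=
  (∀ (a b : Nat) (ha : a < t.length) (hb : b < t.length), a < b → t[a] < t[b])
  ∧ (∀ p ∈ ps, 1 ≤ p.2 ∧ p.2 ≤ pvM ps p.1 + 1)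
  ∧ (∀ p ∈ ps, p.2 ≤ (t.length : Int))
  ∧ (∀ (ℓ : Nat) (h : ℓ < t.length),
      (∃ p ∈ ps, (ℓ : Int) + 1 ≤ p.2 ∧ p.1 = t[ℓ]) ∧
      (∀ p ∈ ps, (ℓ : Int) + 1 ≤ p.2 → t[ℓ] ≤ p.1))

-- generic facts about the fold shape shared by pvM and pvAns
theorem pvSel_init_le (Q : Int × Int → Prop) [DecidablePred Q] (l : List (Int × Int)) (a : Int) :
    a ≤ l.foldl (fun m p => if Q p then max m p.2 else m) a := by
  induction l generalizing a with
  | nil => simp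
  | cons p l ih =>
    simp only [List.foldl_cons]
    refine le_trans ?_ (ih _)
    split <;> simp

theorem pvSel_le (Q : Int × Int → Prop) [DecidablePred Q] (l : List (Int × Int)) (a B : Int)
    (hB : a ≤ B) (h : ∀ p ∈ l, Q p → p.2 ≤ B) :
    l.foldl (fun m p => if Q p then max m p.2 else m) a ≤ B := by
  induction l generalizing a with
  | nil => simpa
  | cons p l ih =>
    simp only [List.foldl_cons]
    refine ih _ ?_ (fun q hq hQ => h q (by simp [hq]) hQ)
    split
    · exact max_le hB (h p (by simp) (by assumption))
    · exact hB

theorem pvle_sel (Q : Int × Int → Prop) [DecidablePred Q] (l : List (Int × Int)) (a : Int)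
    (p : Int × Int) (hp : p ∈ l) (hq : Q p) :
    p.2 ≤ l.foldl (fun m p => if Q p then max m p.2 else m) a := by
  induction l generalizing a with
  | nil => simp at hp
  | cons q l ih =>
    simp only [List.foldl_cons]
    rcases List.mem_cons.mp hp with h | h
    · subst h
      refine le_trans ?_ (pvSel_init_le Q l _)
      simp [hq]
    · exact ih _ h

theorem pvSel_witness (Q : Int × Int → Prop) [DecidablePred Q] (l : List (Int × Int)) (a : Int)
    (h : a < l.foldl (fun m p => if Q p then max m p.2 else m) a) :
    ∃ p ∈ l, Q p ∧ l.foldl (fun m p => if Q p then max m p.2 else m) a ≤ p.2 := by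
  induction l generalizing a with
  | nil => exact absurd h (lt_irrefl a)
  | cons q l ih =>
    simp only [List.foldl_cons] at h ⊢
    by_cases hq : Q q
    · by_cases h2 : (if Q q then max a q.2 else a) < l.foldl (fun m p => if Q p then max m p.2 else m) (if Q q then max a q.2 else a)
      · obtain ⟨p, hp, hQp, hle⟩ := ih _ h2
        exact ⟨p, by simp [hp], hQp, hle⟩
      · replace h2 := not_lt.mp h2
        have h3 := pvSel_init_le Q l (if Q q then max a q.2 else a)
        have h4 : l.foldl (fun m p => if Q p then max m p.2 else m) (if Q q then max a q.2 else a) = (if Q q then max a q.2 else a) := le_antisymm h2 h3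
        refine ⟨q, by simp, hq, ?_⟩
        rw [h4] at h ⊢
        simp only [hq, if_true] at h ⊢
        omega
    · have he : (if Q q then max a q.2 else a) = a := by simp [hq]
      rw [he] at h ⊢
      obtain ⟨p, hp, hQp, hle⟩ := ih _ h
      exact ⟨p, by simp [hp], hQp, hle⟩

theorem pvM_nonneg (ps : List (Int × Int)) (x : Int) : 0 ≤ pvM ps x :=
  pvSel_init_le _ ps 0

theorem pvM_append_single (ps : List (Int × Int)) (p : Int × Int) (x : Int) :
    pvM (ps ++ [p]) x = if p.1 < x then max (pvM ps x) p.2 else pvM ps x := by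
  simp [pvM, List.foldl_append]

theorem pvAns_append_single (ps : List (Int × Int)) (p : Int × Int) (c : Int) :
    pvAns (ps ++ [p]) c = if p.1 = c then max (pvAns ps c) p.2 else pvAns ps c := by
  simp [pvAns, List.foldl_append]

theorem pvM_le_append (ps : List (Int × Int)) (p : Int × Int) (x : Int) :
    pvM ps x ≤ pvM (ps ++ [p]) x := by
  rw [pvM_append_single]; split <;> simp

theorem pvPairs_append (l : List Int) (x : Int) :
    pvPairs (l ++ [x]) = pvPairs l ++ [(x, pvM (pvPairs l) x + 1)] := by
  simp [pvPairs, List.foldl_append, pvStep]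

theorem fst_pvPairs (l : List Int) : (pvPairs l).map (·.1) = l := by
  induction l using List.reverseRecOn with
  | nil => rfl
  | append_singleton ys x ih => rw [pvPairs_append]; simp [ih]

theorem length_pvPairs (l : List Int) : (pvPairs l).length = l.length := by
  have := congrArg List.length (fst_pvPairs l); simpa using this

theorem pvM_filter (ps : List (Int × Int)) (x c : Int) (hxc : x ≤ c) :
    pvM (ps.filter (fun p => decide (p.1 < c))) x = pvM ps x := by
  suffices h : ∀ (a : Int) (ps : List (Int × Int)),
      (ps.filter (fun p => decide (p.1 < c))).foldl (fun m p => if p.1 < x then max m p.2 else m) a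
      = ps.foldl (fun m p => if p.1 < x then max m p.2 else m) a by
    simpa [pvM] using h 0 ps
  intro a ps
  induction ps generalizing a with
  | nil => rfl
  | cons p ps ih =>
    by_cases hp : p.1 < c
    · simp only [List.filter_cons, decide_eq_true_eq, hp, if_true, List.foldl_cons]
      exact ih _
    · have hx : ¬ p.1 < x := fun hlt => hp (lt_of_lt_of_le hlt hxc)
      simp only [List.filter_cons, decide_eq_true_eq, hp, if_false, List.foldl_cons, hx]
      exact ih _

theorem pvPairs_filter (l : List Int) (c : Int) :
    pvPairs (pvFlt l c) = (pvPairs l).filter (fun p => decide (p.1 < c)) := by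
  induction l using List.reverseRecOn with
  | nil => rfl
  | append_singleton ys x ih =>
    by_cases hx : x < c
    · have hflt : pvFlt (ys ++ [x]) c = pvFlt ys c ++ [x] := by
        simp [pvFlt, List.filter_append, hx]
      rw [hflt, pvPairs_append, pvPairs_append, List.filter_append, ih,
          pvM_filter (pvPairs ys) x c (le_of_lt hx)]
      simp [hx]
    · have hflt : pvFlt (ys ++ [x]) c = pvFlt ys c := by
        simp [pvFlt, List.filter_append, hx]
      rw [hflt, pvPairs_append, List.filter_append, ih]
      simp [hx]

-- members of the filtered pairs all have first component < c
theorem pvFlt_mem_lt (l : List Int) (c : Int) (p : Int × Int)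
    (hp : p ∈ pvPairs (pvFlt l c)) : p.1 < c := by
  rw [pvPairs_filter] at hp
  simpa using (List.mem_filter.mp hp).2

-- under the invariant, the tails length is the maximal dp value
theorem pvLen_eq (fps : List (Int × Int)) (t : List Int) (c : Int)
    (inv : pvInv fps t) (hall : ∀ p ∈ fps, p.1 < c) :
    (t.length : Int) = pvM fps c := by
  obtain ⟨hs, hb, h3, h4⟩ := inv
  have hle : pvM fps c ≤ (t.length : Int) := by
    unfold pvM
    exact pvSel_le _ _ _ _ (Int.natCast_nonneg _) (fun p hp _ => h3 p hp)
  have hge : (t.length : Int) ≤ pvM fps c := by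
    rcases Nat.eq_zero_or_pos t.length with h0 | h0
    · rw [h0]; exact_mod_cast pvM_nonneg fps c
    · have hl : t.length - 1 < t.length := by omega
      obtain ⟨⟨p, hp, hd, _⟩, _⟩ := h4 (t.length - 1) hl
      have hple : p.2 ≤ pvM fps c := by
        unfold pvM
        exact pvle_sel _ _ _ p hp (hall p hp)
      omega
  omega

-- bisect_left lands exactly at pvM fps x
theorem pvBisect_eq (fps : List (Int × Int)) (t : List Int) (x : Int)
    (inv : pvInv fps t) :
    (PySem.List.bisectLeft t x : Int) = pvM fps x := by
  obtain ⟨hs, hb, h3, h4⟩ := inv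
  obtain ⟨hle, hlt, hge⟩ := PySem.List.bisectLeft_spec t x
    (List.pairwise_iff_getElem.mpr (fun i j hi hj hij => le_of_lt (hs i j hi hj hij)))
  set i := PySem.List.bisectLeft t x with hidef
  have hm0 : 0 ≤ pvM fps x := pvM_nonneg fps x
  have hmlen : pvM fps x ≤ (t.length : Int) := by
    unfold pvM
    exact pvSel_le _ _ _ _ (Int.natCast_nonneg _) (fun p hp _ => h3 p hp)
  rcases lt_trichotomy (i : Int) (pvM fps x) with h | h | h
  · have hpos : (0 : Int) < pvM fps x := lt_of_le_of_lt (Int.natCast_nonneg i) h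
    have hw : ∃ p ∈ fps, p.1 < x ∧ fps.foldl (fun m p => if p.1 < x then max m p.2 else m) 0 ≤ p.2 :=
      pvSel_witness (fun p => p.1 < x) fps 0 (by unfold pvM at hpos; exact hpos)
    obtain ⟨p, hp, hQ, hple⟩ := hw
    have hple2 : pvM fps x ≤ p.2 := hple
    have hiLt : i < t.length := by exact_mod_cast lt_of_lt_of_le h hmlen
    have hxle := hge i hiLt (le_refl i)
    have htp : t[i] ≤ p.1 := (h4 i hiLt).2 p hp (by omega)
    exact absurd (lt_of_le_of_lt htp hQ) (not_lt.mpr hxle)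
  · exact h
  · have hi1 : i - 1 < t.length := by omega
    have hlt' := hlt (i - 1) hi1 (by omega)
    obtain ⟨⟨p, hp, hd, hfst⟩, _⟩ := h4 (i - 1) hi1
    have hple : p.2 ≤ pvM fps x := by
      unfold pvM
      exact pvle_sel _ _ _ p hp (by rw [hfst]; exact hlt')
    omega

-- one patience step preserves the invariant
theorem pvInv_step (fps : List (Int × Int)) (t : List Int) (x : Int)
    (inv : pvInv fps t) :
    pvInv (fps ++ [(x, pvM fps x + 1)])
      (if PySem.List.bisectLeft t x = t.length then t ++ [x]
       else t.set (PySem.List.bisectLeft t x) x) := by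
  have hieq := pvBisect_eq fps t x inv
  obtain ⟨hs, hb, h3, h4⟩ := inv
  obtain ⟨hle, hltl, hgel⟩ := PySem.List.bisectLeft_spec t x
    (List.pairwise_iff_getElem.mpr (fun i j hi hj hij => le_of_lt (hs i j hi hj hij)))
  set i := PySem.List.bisectLeft t x with hidef
  have hm0 : 0 ≤ pvM fps x := pvM_nonneg fps x
  have hMnew : pvM fps x ≤ pvM (fps ++ [(x, pvM fps x + 1)]) x := pvM_le_append _ _ _
  have hstrict : ∀ (j : Nat) (hj : j < t.length), i < j → x < t[j] := by
    intro j hj hij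
    rcases lt_or_eq_of_le (hgel j hj (le_of_lt hij)) with h | h
    · exact h
    · exfalso
      obtain ⟨⟨p, hp, hd, hfst⟩, _⟩ := h4 j hj
      have hbp := (hb p hp).2
      rw [hfst, ← h] at hbp
      omega
  have hb' : ∀ p ∈ fps ++ [(x, pvM fps x + 1)],
      1 ≤ p.2 ∧ p.2 ≤ pvM (fps ++ [(x, pvM fps x + 1)]) p.1 + 1 := by
    intro p hp
    rcases List.mem_append.mp hp with h | h
    · refine ⟨(hb p h).1, le_trans (hb p h).2 ?_⟩
      have := pvM_le_append fps (x, pvM fps x + 1) p.1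
      omega
    · simp only [List.mem_singleton] at h
      subst h
      exact ⟨show (1 : Int) ≤ pvM fps x + 1 by omega,
             show pvM fps x + 1 ≤ pvM (fps ++ [(x, pvM fps x + 1)]) x + 1 by omega⟩
  by_cases hcase : i = t.length
  · -- append case
    have hmt : pvM fps x = (t.length : Int) := by rw [← hieq, hcase]
    rw [if_pos hcase]
    have hgx : ∀ (h : t.length < t.length + 1), (t ++ [x])[t.length]'(by simp) = x := by
      intro h; simp
    refine ⟨?_, hb', ?_, ?_⟩
    · intro a b ha hb2 hab
      simp only [List.length_append, List.length_singleton] at ha hb2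
      by_cases hbt : b < t.length
      · rw [List.getElem_append_left (lt_trans hab hbt), List.getElem_append_left hbt]
        exact hs a b (lt_trans hab hbt) hbt hab
      · have hbeq : b = t.length := by omega
        subst hbeq
        rw [List.getElem_append_left hab, hgx hb2]
        exact hltl a hab (by omega)
    · intro p hp
      simp only [List.length_append, List.length_singleton]
      rcases List.mem_append.mp hp with h | h
      · have := h3 p h; push_cast; omega
      · simp only [List.mem_singleton] at h; subst h
        show pvM fps x + 1 ≤ _
        push_cast; omega
    · intro ℓ hℓ
      simp only [List.length_append, List.length_singleton] at hℓ
      by_cases hlt : ℓ < t.length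
      · constructor
        · obtain ⟨p, hp, hd, hfst⟩ := (h4 ℓ hlt).1
          exact ⟨p, List.mem_append_left _ hp, hd,
            by rw [List.getElem_append_left hlt]; exact hfst⟩
        · intro p hp hd
          rw [List.getElem_append_left hlt]
          rcases List.mem_append.mp hp with h | h
          · exact (h4 ℓ hlt).2 p h hd
          · simp only [List.mem_singleton] at h; subst h
            exact le_of_lt (hltl ℓ hlt (by omega))
      · have hleq : ℓ = t.length := by omega
        subst hleq
        constructor
        · refine ⟨(x, pvM fps x + 1), List.mem_append_right _ (by simp), ?_, ?_⟩
          · show ((t.length : Nat) : Int) + 1 ≤ pvM fps x + 1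
            omega
          · show x = _
            rw [hgx hℓ]
        · intro p hp hd
          rcases List.mem_append.mp hp with h | h
          · exfalso; have := h3 p h; omega
          · simp only [List.mem_singleton] at h; subst h
            rw [hgx hℓ]
  · -- set case
    have hilt : i < t.length := lt_of_le_of_ne hle hcase
    have hmt : pvM fps x = (i : Int) := hieq.symm
    rw [if_neg hcase]
    refine ⟨?_, hb', ?_, ?_⟩
    · intro a b ha hb2 hab
      simp only [List.length_set] at ha hb2
      rw [List.getElem_set, List.getElem_set]
      split_ifs with h1 h2 h3x
      · omega
      · exact hstrict b hb2 (by omega)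
      · exact hltl a ha (by omega)
      · exact hs a b ha hb2 hab
    · intro p hp
      simp only [List.length_set]
      rcases List.mem_append.mp hp with h | h
      · exact h3 p h
      · simp only [List.mem_singleton] at h; subst h
        show pvM fps x + 1 ≤ _
        omega
    · intro ℓ hℓ
      simp only [List.length_set] at hℓ
      constructor
      · by_cases hℓi : ℓ = i
        · refine ⟨(x, pvM fps x + 1), List.mem_append_right _ (by simp), ?_, ?_⟩
          · show (ℓ : Int) + 1 ≤ pvM fps x + 1
            omega
          · show x = _
            rw [List.getElem_set, if_pos hℓi.symm]
        · obtain ⟨p, hp, hd, hfst⟩ := (h4 ℓ hℓ).1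
          refine ⟨p, List.mem_append_left _ hp, hd, ?_⟩
          rw [List.getElem_set, if_neg (fun h => hℓi h.symm)]
          exact hfst
      · intro p hp hd
        rcases List.mem_append.mp hp with h | h
        · by_cases hℓi : ℓ = i
          · rw [List.getElem_set, if_pos hℓi.symm]
            exact le_trans (hgel ℓ hℓ (by omega)) ((h4 ℓ hℓ).2 p h hd)
          · rw [List.getElem_set, if_neg (fun h => hℓi h.symm)]
            exact (h4 ℓ hℓ).2 p h hd
        · simp only [List.mem_singleton] at h; subst h
          have hd2 : (ℓ : Int) + 1 ≤ pvM fps x + 1 := hd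
          have hℓle : ℓ ≤ i := by omega
          by_cases hℓi : ℓ = i
          · rw [List.getElem_set, if_pos hℓi.symm]
          · rw [List.getElem_set, if_neg (fun h => hℓi h.symm)]
            exact le_of_lt (hltl ℓ hℓ (by omega))

-- ---- characterization of port A ----

theorem pv_getD_append_length (l r : List Int) (y d : Int) :
    (l ++ y :: r).getD l.length d = y := by
  induction l with
  | nil => rfl
  | cons a l ih => simpa using ih

theorem pv_set_append_length (l r : List Int) (y v : Int) :
    (l ++ y :: r).set l.length v = l ++ v :: r := by
  induction l with
  | nil => rfl
  | cons a l ih => simpa using ih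

theorem pv_pyGetD_append_left (front l : List Int) (j d : Int)
    (h0 : 0 ≤ j) (hj : j < (front.length : Int)) :
    PySem.List.pyGetD (front ++ l) j d = PySem.List.pyGetD front j d := by
  obtain ⟨n, rfl⟩ := Int.eq_ofNat_of_zero_le h0
  have hn : n < front.length := by exact_mod_cast hj
  rw [PySem.List.pyGetD_natCast, PySem.List.pyGetD_natCast,
      List.getD_eq_getElem?_getD, List.getD_eq_getElem?_getD,
      List.getElem?_append_left hn]

-- collapse an inner loop that only writes cell `n = front.length`
theorem pvL2a (P : Int → Prop) [DecidablePred P] (js : List Int) (front rest : List Int)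
    (a : Int) (n : Nat) (hn : front.length = n)
    (hb : ∀ j ∈ js, 0 ≤ j ∧ j < (n : Int)) :
    js.foldl (fun dp j => if P j then
        PySem.List.pySetD dp (n : Int)
          (max (PySem.List.pyGetD dp (n : Int) 0) (PySem.List.pyGetD dp j 0))
      else dp) (front ++ a :: rest)
    = front ++ (js.foldl (fun m j => if P j then max m (PySem.List.pyGetD front j 0) else m) a) :: rest := by
  subst hn
  induction js generalizing a with
  | nil => rfl
  | cons j js ih =>
    obtain ⟨hj0, hjlen⟩ := hb j (by simp)
    have hbt : ∀ j' ∈ js, 0 ≤ j' ∧ j' < (front.length : Int) := fun j' hj' => hb j' (by simp [hj'])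
    simp only [List.foldl_cons]
    have e1 : PySem.List.pyGetD (front ++ a :: rest) (front.length : Int) 0 = a := by
      rw [PySem.List.pyGetD_natCast]; exact pv_getD_append_length front rest a 0
    have e2 : PySem.List.pyGetD (front ++ a :: rest) j 0 = PySem.List.pyGetD front j 0 :=
      pv_pyGetD_append_left front (a :: rest) j 0 hj0 hjlen
    by_cases hP : P j
    · have e3 : PySem.List.pySetD (front ++ a :: rest) (front.length : Int)
          (max a (PySem.List.pyGetD front j 0)) = front ++ (max a (PySem.List.pyGetD front j 0)) :: rest := by
        rw [PySem.List.pySetD_natCast]; exact pv_set_append_length front rest a _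
      rw [if_pos hP, if_pos hP, e1, e2, e3]
      exact ih _ hbt
    · rw [if_neg hP, if_neg hP]
      exact ih _ hbt

-- an index fold reading two parallel arrays is a fold over the pairs
theorem pvLgen (f : Int → Int → Int → Int) :
    ∀ (ps : List (Int × Int)) (ta tb : List Int) (a : Int),
    (PySem.List.pyRange 0 ((ps.length : Int)) 1).foldl
      (fun m j => f m (PySem.List.pyGetD (ps.map (·.1) ++ ta) j 0)
                      (PySem.List.pyGetD (ps.map (·.2) ++ tb) j 0)) a
    = ps.foldl (fun m p => f m p.1 p.2) a := by
  intro ps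
  induction ps using List.reverseRecOn with
  | nil =>
    intro ta tb a
    rw [show ((([] : List (Int × Int)).length : Int)) = 0 by simp,
        PySem.List.pyRange_one_eq_nil (le_refl 0)]
    rfl
  | append_singleton qs q ih =>
    intro ta tb a
    have hlen : (((qs ++ [q]).length : Nat) : Int) = ((qs.length : Nat) : Int) + 1 := by
      simp [List.length_append]
    rw [hlen, PySem.List.pyRange_one_succ_right (Int.natCast_nonneg _), List.foldl_append]
    have e1 : ((qs ++ [q]).map (·.1) ++ ta) = qs.map (·.1) ++ (q.1 :: ta) := by simp
    have e2 : ((qs ++ [q]).map (·.2) ++ tb) = qs.map (·.2) ++ (q.2 :: tb) := by simp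
    rw [e1, e2, ih (q.1 :: ta) (q.2 :: tb) a]
    simp only [List.foldl_cons, List.foldl_nil, List.foldl_append]
    have g1 : PySem.List.pyGetD (qs.map (·.1) ++ q.1 :: ta) ((qs.length : Nat) : Int) 0 = q.1 := by
      rw [PySem.List.pyGetD_natCast]
      have := pv_getD_append_length (qs.map (·.1)) ta q.1 0
      simpa using this
    have g2 : PySem.List.pyGetD (qs.map (·.2) ++ q.2 :: tb) ((qs.length : Nat) : Int) 0 = q.2 := by
      rw [PySem.List.pyGetD_natCast]
      have := pv_getD_append_length (qs.map (·.2)) tb q.2 0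
      simpa using this
    rw [g1, g2]

-- the dp array computed by A's outer loop is the snd projection of pvPairs
theorem pvL1 : ∀ (pre ext : List Int),
    (PySem.List.pyRange 0 ((pre.length : Int)) 1).foldl (fun dp i =>
      let dp :=
        (PySem.List.pyRange 0 i 1).foldl (fun dp j =>
          if PySem.List.pyGetD (pre ++ ext) j 0 < PySem.List.pyGetD (pre ++ ext) i 0 then
            PySem.List.pySetD dp i (max (PySem.List.pyGetD dp i 0) (PySem.List.pyGetD dp j 0))
          else dp) dp
      PySem.List.pySetD dp i (PySem.List.pyGetD dp i 0 + 1))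
      (List.replicate (pre.length + ext.length) 0)
    = (pvPairs pre).map (·.2) ++ List.replicate ext.length 0 := by
  intro pre
  induction pre using List.reverseRecOn with
  | nil =>
    intro ext
    rw [show ((([] : List Int).length : Nat) : Int) = 0 by simp,
        PySem.List.pyRange_one_eq_nil (le_refl 0)]
    simp [pvPairs]
  | append_singleton ys x ih =>
    intro ext
    have hlen : (((ys ++ [x]).length : Nat) : Int) = ((ys.length : Nat) : Int) + 1 := by
      simp [List.length_append]
    rw [hlen, PySem.List.pyRange_one_succ_right (Int.natCast_nonneg _), List.foldl_append]
    have ha : (ys ++ [x]) ++ ext = ys ++ (x :: ext) := by simp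
    have hrep : (ys ++ [x]).length + ext.length = ys.length + (x :: ext).length := by
      simp; omega
    rw [ha, hrep, ih (x :: ext)]
    rw [show (x :: ext).length = ext.length + 1 from rfl, List.replicate_succ]
    rw [pvPairs_append, List.map_append]
    have hfst := fst_pvPairs ys
    have hlen2 := length_pvPairs ys
    generalize hg : pvPairs ys = ps at hfst hlen2 ⊢
    rw [← hfst]
    simp only [List.foldl_cons, List.foldl_nil, List.length_map]
    have hX : PySem.List.pyGetD (ps.map (·.1) ++ x :: ext) ((ps.length : Nat) : Int) 0 = x := by
      rw [PySem.List.pyGetD_natCast]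
      have h1 := pv_getD_append_length (ps.map (·.1)) ext x 0
      simpa using h1
    rw [hX]
    have hin := pvL2a (fun j => PySem.List.pyGetD (ps.map (·.1) ++ x :: ext) j 0 < x)
        (PySem.List.pyRange 0 ((ps.length : Nat) : Int) 1) (ps.map (·.2))
        (List.replicate ext.length 0) 0 ps.length (by simp)
        (fun j hj => by
          have h2 := PySem.List.mem_pyRange_one.mp hj
          exact ⟨h2.1, h2.2⟩)
    rw [hin]
    have e1 : ∀ c : Int, PySem.List.pyGetD (ps.map (·.2) ++ c :: List.replicate ext.length 0) ((ps.length : Nat) : Int) 0 = c := by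
      intro c
      rw [PySem.List.pyGetD_natCast]
      have := pv_getD_append_length (ps.map (·.2)) (List.replicate ext.length 0) c 0
      simpa using this
    have e2 : ∀ c v : Int, PySem.List.pySetD (ps.map (·.2) ++ c :: List.replicate ext.length 0) ((ps.length : Nat) : Int) v = ps.map (·.2) ++ v :: List.replicate ext.length 0 := by
      intro c v
      rw [PySem.List.pySetD_natCast]
      have := pv_set_append_length (ps.map (·.2)) (List.replicate ext.length 0) c v
      simpa using this
    rw [e1, e2]
    have hsmall : (PySem.List.pyRange 0 ((ps.length : Nat) : Int) 1).foldl
        (fun m j => if PySem.List.pyGetD (ps.map (·.1) ++ x :: ext) j 0 < x then max m (PySem.List.pyGetD (ps.map (·.2)) j 0) else m) 0 = pvM ps x := by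
      have := pvLgen (fun m v d => if v < x then max m d else m) ps (x :: ext) [] 0
      simpa [pvM] using this
    rw [hsmall]
    simp

theorem portA_char (nums : List Int) (target : Int) :
    longest_increasing_subsequence_with_target nums target = pvAns (pvPairs nums) target := by
  unfold longest_increasing_subsequence_with_target
  simp only [PySem.List.len_eq, Int.toNat_natCast]
  have h1 := pvL1 nums []
  simp only [List.append_nil, List.length_nil, Nat.add_zero, List.replicate_zero] at h1
  rw [h1]
  have hfst := fst_pvPairs nums
  have hlen2 := length_pvPairs nums
  generalize hg : pvPairs nums = ps at hfst hlen2 ⊢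
  rw [← hfst]
  simp only [List.length_map]
  have h2 := pvLgen (fun m v d => if v = target then max m d else m) ps [] [] 0
  simpa [pvAns] using h2

-- ---- characterization of port B ----

theorem portB_char (nums : List Int) (target : Int) :
    (nums.foldl (fun (st : List Int × Int) x =>
      if x = target then (st.1, 1 + PySem.List.len st.1)
      else if x < target then
        let i := PySem.List.bisectLeft st.1 x
        if i = st.1.length then (st.1 ++ [x], st.2) else (st.1.set i x, st.2)
      else st) ([], 0)).2 = pvAns (pvPairs nums) target := by
  suffices h : ∀ l : List Int,
      pvInv (pvPairs (pvFlt l target))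
        ((l.foldl (fun (st : List Int × Int) x =>
          if x = target then (st.1, 1 + PySem.List.len st.1)
          else if x < target then
            let i := PySem.List.bisectLeft st.1 x
            if i = st.1.length then (st.1 ++ [x], st.2) else (st.1.set i x, st.2)
          else st) ([], 0)).1)
      ∧ ((l.foldl (fun (st : List Int × Int) x =>
          if x = target then (st.1, 1 + PySem.List.len st.1)
          else if x < target then
            let i := PySem.List.bisectLeft st.1 x
            if i = st.1.length then (st.1 ++ [x], st.2) else (st.1.set i x, st.2)
          else st) ([], 0)).2 = pvAns (pvPairs l) target)
      ∧ pvAns (pvPairs l) target ≤ pvM (pvPairs l) target + 1 by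
    exact (h nums).2.1
  intro l
  induction l using List.reverseRecOn with
  | nil =>
    refine ⟨⟨?_, ?_, ?_, ?_⟩, rfl, ?_⟩
    · intro a b ha hb hab; simp at ha
    · intro p hp; simp [pvPairs, pvFlt] at hp
    · intro p hp; simp [pvPairs, pvFlt] at hp
    · intro ℓ hℓ; simp at hℓ
    · show pvAns [] target ≤ pvM [] target + 1
      simp [pvAns, pvM]
  | append_singleton ys x ih =>
    obtain ⟨inv, hans, hbnd⟩ := ih
    rw [List.foldl_append]
    simp only [List.foldl_cons, List.foldl_nil]
    set st := ys.foldl (fun (st : List Int × Int) x =>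
          if x = target then (st.1, 1 + PySem.List.len st.1)
          else if x < target then
            let i := PySem.List.bisectLeft st.1 x
            if i = st.1.length then (st.1 ++ [x], st.2) else (st.1.set i x, st.2)
          else st) ([], 0) with hst
    by_cases hx1 : x = target
    · subst hx1
      rw [if_pos rfl]
      have hflt : pvFlt (ys ++ [x]) x = pvFlt ys x := by
        simp [pvFlt, List.filter_append]
      have hps : pvPairs (ys ++ [x]) = pvPairs ys ++ [(x, pvM (pvPairs ys) x + 1)] :=
        pvPairs_append ys x
      have hallf : ∀ p ∈ pvPairs (pvFlt ys x), p.1 < x := fun p hp => pvFlt_mem_lt ys x p hp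
      have hMeq : pvM (pvPairs (pvFlt ys x)) x = pvM (pvPairs ys) x := by
        rw [pvPairs_filter]
        exact pvM_filter (pvPairs ys) x x (le_refl x)
      refine ⟨by rw [hflt]; exact inv, ?_, ?_⟩
      · show 1 + PySem.List.len st.1 = _
        rw [PySem.List.len_eq, pvLen_eq (pvPairs (pvFlt ys x)) st.1 x inv hallf, hMeq,
            hps, pvAns_append_single]
        rw [if_pos rfl]
        have : pvAns (pvPairs ys) x ≤ pvM (pvPairs ys) x + 1 := hbnd
        omega
      · rw [hps, pvAns_append_single, if_pos rfl]
        have h1 : pvM (pvPairs ys) x ≤ pvM (pvPairs ys ++ [(x, pvM (pvPairs ys) x + 1)]) x :=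
          pvM_le_append _ _ _
        omega
    · rw [if_neg hx1]
      have hps : pvPairs (ys ++ [x]) = pvPairs ys ++ [(x, pvM (pvPairs ys) x + 1)] :=
        pvPairs_append ys x
      have hansnew : pvAns (pvPairs (ys ++ [x])) target = pvAns (pvPairs ys) target := by
        rw [hps, pvAns_append_single, if_neg hx1]
      have hbndnew : pvAns (pvPairs (ys ++ [x])) target ≤ pvM (pvPairs (ys ++ [x])) target + 1 := by
        rw [hansnew, hps]
        have := pvM_le_append (pvPairs ys) (x, pvM (pvPairs ys) x + 1) target
        omega
      by_cases hx2 : x < target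
      · rw [if_pos hx2]
        have hflt : pvFlt (ys ++ [x]) target = pvFlt ys target ++ [x] := by
          simp [pvFlt, List.filter_append, hx2]
        have hfps : pvPairs (pvFlt (ys ++ [x]) target)
            = pvPairs (pvFlt ys target) ++ [(x, pvM (pvPairs (pvFlt ys target)) x + 1)] := by
          rw [hflt, pvPairs_append]
        refine ⟨?_, ?_, hbndnew⟩
        · rw [hfps]
          have hstep := pvInv_step (pvPairs (pvFlt ys target)) st.1 x inv
          by_cases hc : PySem.List.bisectLeft st.1 x = st.1.length
          · rw [if_pos hc] at hstep ⊢
            simpa using hstep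
          · rw [if_neg hc] at hstep ⊢
            simpa using hstep
        · show (if PySem.List.bisectLeft st.1 x = st.1.length then (st.1 ++ [x], st.2) else (st.1.set (PySem.List.bisectLeft st.1 x) x, st.2)).2 = _
          rw [hansnew, ← hans]
          by_cases hc : PySem.List.bisectLeft st.1 x = st.1.length
          · rw [if_pos hc]
          · rw [if_neg hc]
      · rw [if_neg hx2]
        have hflt : pvFlt (ys ++ [x]) target = pvFlt ys target := by
          simp [pvFlt, List.filter_append, hx2]
        exact ⟨by rw [hflt]; exact inv, by rw [hansnew, ← hans], hbndnew⟩

-- ===== VERDICT (by name: the statement is the Claim_ definition above) =====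
theorem longest_increasing_subsequence_with_target_spec : Claim_equal_longest_increasing_subsequence_with_target := by
  intro nums target _
  show _ = _
  rw [portA_char]
  unfold longest_increasing_subsequence_with_target_alt
  rw [portB_char]
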